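-- pv_equiv track=rewrite | github.com/snucclab/CoComTag_public | utils/calc_kappa.py | gold_inds_to_one_hot
-- ===== SOURCE A (Python) =====
-- def gold_inds_to_one_hot(ind_list):
--     sf_a = []
--     sf_b = []
--     sf_c = []
--     sf_d = []
--     sf_e = []
--     sf_f = []
--     sf_x = []
--
--     for ind in ind_list:
--         ind_a, ind_b, ind_c, ind_d, ind_e, ind_f, ind_x = 0, 0, 0, 0, 0, 0, 0
--         for i in ind[0].strip("\"").replace(' ','').split(','):
--             if i in ['a','b','c']:
--                 ind_a = 1
--             if i in ['d','e']:
--                 ind_b = 1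
--             if i in ['f','g','h','i']:
--                 ind_c = 1
--             if i in ['j','k']:
--                 ind_d = 1
--             if i in ['l','m','n']:
--                 ind_e = 1
--             if i in ['o','p','q']:
--                 ind_f = 1
--             if i == 'x':
--                 ind_x = 1
--             if i == '-':
--                 ind_x = 1
--         sf_a.append(ind_a)
--         sf_b.append(ind_b)
--         sf_c.append(ind_c)
--         sf_d.append(ind_d)
--         sf_e.append(ind_e)
--         sf_f.append(ind_f)
--         sf_x.append(ind_x)
--
--     return sf_a, sf_b, sf_c, sf_d, sf_e, sf_f, sf_x
-- ===== SOURCE B (Python) =====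
-- _CAT = {'a': 0, 'b': 0, 'c': 0, 'd': 1, 'e': 1, 'f': 2, 'g': 2, 'h': 2, 'i': 2,
--         'j': 3, 'k': 3, 'l': 4, 'm': 4, 'n': 4, 'o': 5, 'p': 5, 'q': 5,
--         'x': 6, '-': 6}
--
--
-- def gold_inds_to_one_hot(ind_list):
--     rows = []
--     for ind in ind_list:
--         seen = set()
--         for tok in ind[0].strip('"').replace(' ', '').split(','):
--             if tok in _CAT:
--                 seen.add(_CAT[tok])
--         rows.append([1 if k in seen else 0 for k in range(7)])
--     return tuple([row[k] for row in rows] for k in range(7))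
-- ===== Notes on version B (the rewrite author's own statement) =====
-- stated objective: idiomatic
-- what changed: Replaces seven per-token membership if-chains and seven parallel flag accumulators with one constant token-to-category dict, a per-entry set of seen category slots, and a build-rows-then-transpose construction of the seven output lists.
-- outside the precondition, e.g. on gold_inds_to_one_hot([[]]): A raises IndexError, B raises IndexError
import Mathlib
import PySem

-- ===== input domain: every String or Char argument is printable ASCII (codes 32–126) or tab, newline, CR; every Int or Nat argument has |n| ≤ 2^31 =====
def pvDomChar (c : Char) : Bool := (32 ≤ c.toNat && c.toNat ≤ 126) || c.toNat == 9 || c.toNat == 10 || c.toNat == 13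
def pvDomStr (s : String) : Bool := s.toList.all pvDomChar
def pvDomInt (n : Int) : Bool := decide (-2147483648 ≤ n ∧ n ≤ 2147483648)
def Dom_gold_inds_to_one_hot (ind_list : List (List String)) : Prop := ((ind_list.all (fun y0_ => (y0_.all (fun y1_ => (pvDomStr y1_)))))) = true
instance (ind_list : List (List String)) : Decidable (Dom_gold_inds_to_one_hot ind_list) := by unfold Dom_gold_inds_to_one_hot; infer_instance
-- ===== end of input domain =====

-- B replaces A's seven per-token if-chains and seven flag accumulators by a constant
-- token-to-category dict, a per-entry set of seen slots, and a rows-then-transpose construction (idiomatic).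
-- Both ports read ind[0] as pyGetD ind 0 "" - faithful on Pre_ (Python raises IndexError on an empty inner list, excluded by Pre_).

-- ===== PORT A =====
abbrev pvFlags := Int × Int × Int × Int × Int × Int × Int

-- the tokens of one entry: ind[0].strip('"').replace(' ','').split(',')
def pvToksA (ind : List String) : List String :=
  (PySem.Str.split? (PySem.Str.replace (PySem.Str.stripChars (PySem.List.pyGetD ind 0 "") "\"") " " "") ",").getD []

def pvStepA (st : pvFlags) (i : String) : pvFlags :=
  let a := if i ∈ ["a","b","c"] then (1:Int) else st.1
  let b := if i ∈ ["d","e"] then (1:Int) else st.2.1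
  let c := if i ∈ ["f","g","h","i"] then (1:Int) else st.2.2.1
  let d := if i ∈ ["j","k"] then (1:Int) else st.2.2.2.1
  let e := if i ∈ ["l","m","n"] then (1:Int) else st.2.2.2.2.1
  let f := if i ∈ ["o","p","q"] then (1:Int) else st.2.2.2.2.2.1
  let x := if i = "x" then (1:Int) else st.2.2.2.2.2.2
  let x := if i = "-" then (1:Int) else x
  (a, b, c, d, e, f, x)

def gold_inds_to_one_hot (ind_list : List (List String)) : List Int × List Int × List Int × List Int × List Int × List Int × List Int :=
  ind_list.foldl (fun acc ind =>
      let fl := (pvToksA ind).foldl pvStepA (0, 0, 0, 0, 0, 0, 0)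
      (acc.1 ++ [fl.1], acc.2.1 ++ [fl.2.1], acc.2.2.1 ++ [fl.2.2.1],
       acc.2.2.2.1 ++ [fl.2.2.2.1], acc.2.2.2.2.1 ++ [fl.2.2.2.2.1],
       acc.2.2.2.2.2.1 ++ [fl.2.2.2.2.2.1], acc.2.2.2.2.2.2 ++ [fl.2.2.2.2.2.2]))
    ([], [], [], [], [], [], [])

-- ===== PORT B =====
def pvCat : PySem.Dict String Int :=
  PySem.Dict.ofList [("a",0),("b",0),("c",0),("d",1),("e",1),("f",2),("g",2),("h",2),("i",2),("j",3),("k",3),("l",4),("m",4),("n",4),("o",5),("p",5),("q",5),("x",6),("-",6)]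

def pvStepB (s : PySem.Set Int) (tok : String) : PySem.Set Int :=
  match PySem.Dict.get? pvCat tok with
  | some c => PySem.Set.add s c
  | none => s

def pvRowB (ind : List String) : List Int :=
  let toks := (PySem.Str.split? (PySem.Str.replace (PySem.Str.stripChars (PySem.List.pyGetD ind 0 "") "\"") " " "") ",").getD []
  let seen := toks.foldl pvStepB PySem.Set.empty
  (PySem.List.pyRange 0 7 1).map (fun k => if k ∈ seen then (1:Int) else 0)

def gold_inds_to_one_hot_alt (ind_list : List (List String)) : List Int × List Int × List Int × List Int × List Int × List Int × List Int :=
  let rows := ind_list.map pvRowB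
  (rows.map (fun r => PySem.List.pyGetD r 0 0), rows.map (fun r => PySem.List.pyGetD r 1 0),
   rows.map (fun r => PySem.List.pyGetD r 2 0), rows.map (fun r => PySem.List.pyGetD r 3 0),
   rows.map (fun r => PySem.List.pyGetD r 4 0), rows.map (fun r => PySem.List.pyGetD r 5 0),
   rows.map (fun r => PySem.List.pyGetD r 6 0))

-- ===== PRECONDITION & SPEC =====
-- Pre_ excludes exactly the inputs where Python A raises: ind[0] is an IndexError on an empty inner list.
def Pre_gold_inds_to_one_hot (ind_list : List (List String)) : Prop :=
  ∀ ind ∈ ind_list, ind ≠ []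
instance (ind_list : List (List String)) : Decidable (Pre_gold_inds_to_one_hot ind_list) := by
  unfold Pre_gold_inds_to_one_hot; infer_instance

def pvWitness_gold_inds_to_one_hot : List (List String) := [["\"a, d\""], ["x,q"], ["z"]]

def Spec_gold_inds_to_one_hot (ind_list : List (List String)) (out : List Int × List Int × List Int × List Int × List Int × List Int × List Int) : Prop := out = gold_inds_to_one_hot_alt ind_list
instance (ind_list : List (List String)) (out : List Int × List Int × List Int × List Int × List Int × List Int × List Int) : Decidable (Spec_gold_inds_to_one_hot ind_list out) := by unfold Spec_gold_inds_to_one_hot; exact @instDecidableEqProd _ _ _ (@instDecidableEqProd _ _ _ (@instDecidableEqProd _ _ _ (@instDecidableEqProd _ _ _ (@instDecidableEqProd _ _ _ (@instDecidableEqProd _ _ _ _))))) _ _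

-- ===== CLAIM (what is proved, stated in full; the proofs are below) =====
def Claim_equal_gold_inds_to_one_hot : Prop := ∀ (ind_list : List (List String)), Dom_gold_inds_to_one_hot ind_list → Pre_gold_inds_to_one_hot ind_list → Spec_gold_inds_to_one_hot ind_list (gold_inds_to_one_hot ind_list)

-- ===== LEMMAS AND PROOFS =====

-- the seven flags that B's set denotes, as A's tuple state
def pvFlagsOf (t : PySem.Set Int) : pvFlags :=
  (if (0:Int) ∈ t then 1 else 0, if (1:Int) ∈ t then 1 else 0, if (2:Int) ∈ t then 1 else 0,
   if (3:Int) ∈ t then 1 else 0, if (4:Int) ∈ t then 1 else 0, if (5:Int) ∈ t then 1 else 0,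
   if (6:Int) ∈ t then 1 else 0)

lemma pvStep_agree (t : PySem.Set Int) (i : String) :
    pvStepA (pvFlagsOf t) i = pvFlagsOf (pvStepB t i) := by
  by_cases h0 : i = "a"
  · subst h0
    simp [pvStepA, pvStepB, pvFlagsOf, (by decide : PySem.Dict.get? pvCat "a" = some 0), PySem.Set.mem_add]
  by_cases h1 : i = "b"
  · subst h1
    simp [pvStepA, pvStepB, pvFlagsOf, (by decide : PySem.Dict.get? pvCat "b" = some 0), PySem.Set.mem_add]
  by_cases h2 : i = "c"
  · subst h2
    simp [pvStepA, pvStepB, pvFlagsOf, (by decide : PySem.Dict.get? pvCat "c" = some 0), PySem.Set.mem_add]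
  by_cases h3 : i = "d"
  · subst h3
    simp [pvStepA, pvStepB, pvFlagsOf, (by decide : PySem.Dict.get? pvCat "d" = some 1), PySem.Set.mem_add]
  by_cases h4 : i = "e"
  · subst h4
    simp [pvStepA, pvStepB, pvFlagsOf, (by decide : PySem.Dict.get? pvCat "e" = some 1), PySem.Set.mem_add]
  by_cases h5 : i = "f"
  · subst h5
    simp [pvStepA, pvStepB, pvFlagsOf, (by decide : PySem.Dict.get? pvCat "f" = some 2), PySem.Set.mem_add]
  by_cases h6 : i = "g"
  · subst h6
    simp [pvStepA, pvStepB, pvFlagsOf, (by decide : PySem.Dict.get? pvCat "g" = some 2), PySem.Set.mem_add]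
  by_cases h7 : i = "h"
  · subst h7
    simp [pvStepA, pvStepB, pvFlagsOf, (by decide : PySem.Dict.get? pvCat "h" = some 2), PySem.Set.mem_add]
  by_cases h8 : i = "i"
  · subst h8
    simp [pvStepA, pvStepB, pvFlagsOf, (by decide : PySem.Dict.get? pvCat "i" = some 2), PySem.Set.mem_add]
  by_cases h9 : i = "j"
  · subst h9
    simp [pvStepA, pvStepB, pvFlagsOf, (by decide : PySem.Dict.get? pvCat "j" = some 3), PySem.Set.mem_add]
  by_cases h10 : i = "k"
  · subst h10
    simp [pvStepA, pvStepB, pvFlagsOf, (by decide : PySem.Dict.get? pvCat "k" = some 3), PySem.Set.mem_add]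
  by_cases h11 : i = "l"
  · subst h11
    simp [pvStepA, pvStepB, pvFlagsOf, (by decide : PySem.Dict.get? pvCat "l" = some 4), PySem.Set.mem_add]
  by_cases h12 : i = "m"
  · subst h12
    simp [pvStepA, pvStepB, pvFlagsOf, (by decide : PySem.Dict.get? pvCat "m" = some 4), PySem.Set.mem_add]
  by_cases h13 : i = "n"
  · subst h13
    simp [pvStepA, pvStepB, pvFlagsOf, (by decide : PySem.Dict.get? pvCat "n" = some 4), PySem.Set.mem_add]
  by_cases h14 : i = "o"
  · subst h14
    simp [pvStepA, pvStepB, pvFlagsOf, (by decide : PySem.Dict.get? pvCat "o" = some 5), PySem.Set.mem_add]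
  by_cases h15 : i = "p"
  · subst h15
    simp [pvStepA, pvStepB, pvFlagsOf, (by decide : PySem.Dict.get? pvCat "p" = some 5), PySem.Set.mem_add]
  by_cases h16 : i = "q"
  · subst h16
    simp [pvStepA, pvStepB, pvFlagsOf, (by decide : PySem.Dict.get? pvCat "q" = some 5), PySem.Set.mem_add]
  by_cases h17 : i = "x"
  · subst h17
    simp [pvStepA, pvStepB, pvFlagsOf, (by decide : PySem.Dict.get? pvCat "x" = some 6), PySem.Set.mem_add]
  by_cases h18 : i = "-"
  · subst h18
    simp [pvStepA, pvStepB, pvFlagsOf, (by decide : PySem.Dict.get? pvCat "-" = some 6), PySem.Set.mem_add]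
  have hget : PySem.Dict.get? pvCat i = none := by
    rw [(by decide : pvCat = PySem.Dict.mk ([("a",0),("b",0),("c",0),("d",1),("e",1),("f",2),("g",2),("h",2),("i",2),("j",3),("k",3),("l",4),("m",4),("n",4),("o",5),("p",5),("q",5),("x",6),("-",6)] : List (String × Int)))]
    simp [PySem.Dict.get?, Ne.symm h0, Ne.symm h1, Ne.symm h2, Ne.symm h3, Ne.symm h4, Ne.symm h5, Ne.symm h6, Ne.symm h7, Ne.symm h8, Ne.symm h9, Ne.symm h10, Ne.symm h11, Ne.symm h12, Ne.symm h13, Ne.symm h14, Ne.symm h15, Ne.symm h16, Ne.symm h17, Ne.symm h18]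
  simp [pvStepA, pvStepB, hget, pvFlagsOf, h0, h1, h2, h3, h4, h5, h6, h7, h8, h9, h10, h11, h12, h13, h14, h15, h16, h17, h18]

lemma pvFold_agree (toks : List String) (t : PySem.Set Int) :
    toks.foldl pvStepA (pvFlagsOf t) = pvFlagsOf (toks.foldl pvStepB t) := by
  induction toks generalizing t with
  | nil => rfl
  | cons hd tl ih => simpa [pvStep_agree] using ih (pvStepB t hd)

lemma pvEntry_agree (ind : List String) :
    (pvToksA ind).foldl pvStepA (0, 0, 0, 0, 0, 0, 0) =
      (PySem.List.pyGetD (pvRowB ind) 0 0, PySem.List.pyGetD (pvRowB ind) 1 0,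
       PySem.List.pyGetD (pvRowB ind) 2 0, PySem.List.pyGetD (pvRowB ind) 3 0,
       PySem.List.pyGetD (pvRowB ind) 4 0, PySem.List.pyGetD (pvRowB ind) 5 0,
       PySem.List.pyGetD (pvRowB ind) 6 0) := by
  have h0 : ((0,0,0,0,0,0,0) : pvFlags) = pvFlagsOf PySem.Set.empty := by
    simp [pvFlagsOf, PySem.Set.empty]
  have hrange : PySem.List.pyRange 0 7 1 = [0,1,2,3,4,5,6] := by decide
  rw [h0, pvFold_agree]
  simp [pvRowB, pvToksA, pvFlagsOf, hrange, PySem.List.pyGetD, PySem.List.pyGet?,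
        PySem.List.pyIdx?]

lemma pvOuter (l : List (List String))
    (acc : List Int × List Int × List Int × List Int × List Int × List Int × List Int) :
    l.foldl (fun acc ind =>
      let fl := (pvToksA ind).foldl pvStepA (0, 0, 0, 0, 0, 0, 0)
      (acc.1 ++ [fl.1], acc.2.1 ++ [fl.2.1], acc.2.2.1 ++ [fl.2.2.1],
       acc.2.2.2.1 ++ [fl.2.2.2.1], acc.2.2.2.2.1 ++ [fl.2.2.2.2.1],
       acc.2.2.2.2.2.1 ++ [fl.2.2.2.2.2.1], acc.2.2.2.2.2.2 ++ [fl.2.2.2.2.2.2])) acc =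
    (acc.1 ++ l.map (fun ind => PySem.List.pyGetD (pvRowB ind) 0 0),
     acc.2.1 ++ l.map (fun ind => PySem.List.pyGetD (pvRowB ind) 1 0),
     acc.2.2.1 ++ l.map (fun ind => PySem.List.pyGetD (pvRowB ind) 2 0),
     acc.2.2.2.1 ++ l.map (fun ind => PySem.List.pyGetD (pvRowB ind) 3 0),
     acc.2.2.2.2.1 ++ l.map (fun ind => PySem.List.pyGetD (pvRowB ind) 4 0),
     acc.2.2.2.2.2.1 ++ l.map (fun ind => PySem.List.pyGetD (pvRowB ind) 5 0),
     acc.2.2.2.2.2.2 ++ l.map (fun ind => PySem.List.pyGetD (pvRowB ind) 6 0)) := by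
  induction l generalizing acc with
  | nil => simp
  | cons hd tl ih => simp [ih, pvEntry_agree hd]

-- ===== VERDICT (by name: the statement is the Claim_ definition above) =====
theorem gold_inds_to_one_hot_spec : Claim_equal_gold_inds_to_one_hot := by
  intro ind_list _ _
  unfold Spec_gold_inds_to_one_hot gold_inds_to_one_hot gold_inds_to_one_hot_alt
  rw [pvOuter]
  simp [List.map_map, Function.comp]
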